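-- pv_equiv track=rewrite | github.com/axellangenskiold/mini-crossword | crossword-engine/crossword_engine/grid.py | validate_no_singletons
-- ===== SOURCE A (Python) =====
-- from dataclasses import dataclass
-- from typing import Iterable
--
-- @dataclass(frozen=True)
-- class Slot:
--     slot_id: int
--     direction: str
--     number: int
--     cells: list[tuple[int, int]]
--
-- def extract_slots(
--     width: int, height: int, black_cells: Iterable[tuple[int, int]]
-- ) -> tuple[list[Slot], dict[tuple[int, int], list[tuple[int, int]]]]:
--     black_set = {tuple(cell) for cell in black_cells}
--     slots: list[Slot] = []
--     cell_to_slots: dict[tuple[int, int], list[tuple[int, int]]] = {}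
--     next_number = 1
--     slot_id = 0
--
--     for row in range(height):
--         for col in range(width):
--             if (row, col) in black_set:
--                 continue
--
--             starts_across = (
--                 (col == 0 or (row, col - 1) in black_set)
--                 and (col + 1 < width and (row, col + 1) not in black_set)
--             )
--             starts_down = (
--                 (row == 0 or (row - 1, col) in black_set)
--                 and (row + 1 < height and (row + 1, col) not in black_set)
--             )
--
--             number = None
--             if starts_across or starts_down:
--                 number = next_number
--                 next_number += 1
--
--             if starts_across:
--                 cells: list[tuple[int, int]] = []
--                 c = col
--                 while c < width and (row, c) not in black_set:
--                     cells.append((row, c))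
--                     c += 1
--                 slots.append(Slot(slot_id=slot_id, direction="across", number=number, cells=cells))
--                 slot_id += 1
--
--             if starts_down:
--                 cells = []
--                 r = row
--                 while r < height and (r, col) not in black_set:
--                     cells.append((r, col))
--                     r += 1
--                 slots.append(Slot(slot_id=slot_id, direction="down", number=number, cells=cells))
--                 slot_id += 1
--
--     for slot in slots:
--         for index, cell in enumerate(slot.cells):
--             cell_to_slots.setdefault(cell, []).append((slot.slot_id, index))
--
--     return slots, cell_to_slots
--
-- def validate_no_singletons(
--     width: int, height: int, black_cells: Iterable[tuple[int, int]]
-- ) -> bool: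
--     black_set = {tuple(cell) for cell in black_cells}
--     slots, cell_to_slots = extract_slots(width, height, black_set)
--     if not slots:
--         return False
--
--     for row in range(height):
--         for col in range(width):
--             if (row, col) in black_set:
--                 continue
--             if (row, col) not in cell_to_slots:
--                 return False
--     return True
-- ===== SOURCE B (Python) =====
-- def validate_no_singletons(width, height, black_cells):
--     black = {tuple(c) for c in black_cells}
--
--     def open_(r, c):
--         return 0 <= r < height and 0 <= c < width and (r, c) not in black
--
--     found = False
--     ok = True
--     for r in range(height):
--         for c in range(width):
--             if open_(r, c):
--                 found = True
--                 if not (open_(r - 1, c) or open_(r + 1, c)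
--                         or open_(r, c - 1) or open_(r, c + 1)):
--                     ok = False
--     return found and ok
-- ===== Notes on version B (the rewrite author's own statement) =====
-- stated objective: simpler
-- what changed: B drops A's whole slot machinery (run scanning, Slot records, the cell_to_slots dictionary) and instead does one pass over the grid checking that every open cell has an open orthogonal neighbour and that at least one open cell exists.
import Mathlib
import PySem

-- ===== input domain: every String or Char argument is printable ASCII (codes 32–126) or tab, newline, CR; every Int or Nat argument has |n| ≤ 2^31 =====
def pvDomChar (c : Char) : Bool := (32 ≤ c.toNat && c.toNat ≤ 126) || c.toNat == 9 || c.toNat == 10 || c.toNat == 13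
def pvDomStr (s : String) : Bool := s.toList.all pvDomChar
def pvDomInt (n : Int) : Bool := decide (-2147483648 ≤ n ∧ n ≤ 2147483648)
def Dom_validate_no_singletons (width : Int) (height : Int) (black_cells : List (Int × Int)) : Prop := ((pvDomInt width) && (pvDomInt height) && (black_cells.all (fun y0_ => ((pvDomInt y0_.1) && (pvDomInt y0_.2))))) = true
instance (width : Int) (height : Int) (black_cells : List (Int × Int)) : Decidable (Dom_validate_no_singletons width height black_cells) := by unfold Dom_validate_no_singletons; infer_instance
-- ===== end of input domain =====

-- B replaces A's slot extraction (run scanning plus slot/cell_to_slots tables) by a direct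
-- per-cell check: every open cell must have an open orthogonal neighbour and at least one
-- open cell must exist (objective: simpler).

-- ===== PORT A =====
structure PVSlot where
  slot_id : Int
  direction : String
  number : Option Int
  cells : List (Int × Int)

-- 'while c < width and (row, c) not in black_set: cells.append((row, c)); c += 1'
def pvCollectAcross (width : Int) (black : PySem.Set (Int × Int)) (row : Int) (c : Int) :
    List (Int × Int) :=
  if h : c < width ∧ ¬ (PySem.Set.contains black (row, c) = true) then
    (row, c) :: pvCollectAcross width black row (c + 1)
  else []
termination_by (width - c).toNat
decreasing_by omega

-- 'while r < height and (r, col) not in black_set: cells.append((r, col)); r += 1'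
def pvCollectDown (height : Int) (black : PySem.Set (Int × Int)) (r : Int) (col : Int) :
    List (Int × Int) :=
  if h : r < height ∧ ¬ (PySem.Set.contains black (r, col) = true) then
    (r, col) :: pvCollectDown height black (r + 1) col
  else []
termination_by (height - r).toNat
decreasing_by omega

-- body of the nested for-loop of extract_slots; state = (slots, next_number, slot_id)
def pvStepCell (width height : Int) (black : PySem.Set (Int × Int))
    (st : List PVSlot × Int × Int) (row col : Int) : List PVSlot × Int × Int :=
  if PySem.Set.contains black (row, col) then st
  else
    let startsA := (col == 0 || PySem.Set.contains black (row, col - 1)) &&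
                   (decide (col + 1 < width) && ! PySem.Set.contains black (row, col + 1))
    let startsD := (row == 0 || PySem.Set.contains black (row - 1, col)) &&
                   (decide (row + 1 < height) && ! PySem.Set.contains black (row + 1, col))
    let number : Option Int := if startsA || startsD then some st.2.1 else none
    let next_number := if startsA || startsD then st.2.1 + 1 else st.2.1
    let s1 : List PVSlot × Int :=
      if startsA then
        (st.1 ++ [⟨st.2.2, "across", number, pvCollectAcross width black row col⟩], st.2.2 + 1)
      else (st.1, st.2.2)
    let s2 : List PVSlot × Int :=
      if startsD then
        (s1.1 ++ [⟨s1.2, "down", number, pvCollectDown height black row col⟩], s1.2 + 1)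
      else s1
    (s2.1, next_number, s2.2)

def pvExtractSlots (width height : Int) (black_cells : List (Int × Int)) :
    List PVSlot × PySem.Dict (Int × Int) (List (Int × Int)) :=
  let black := PySem.Set.ofList black_cells
  let st := (PySem.List.pyRange 0 height 1).foldl
    (fun st row => (PySem.List.pyRange 0 width 1).foldl
      (fun st col => pvStepCell width height black st row col) st)
    ([], 1, 0)
  let slots := st.1
  let cell_to_slots := slots.foldl
    (fun d slot => (PySem.List.enumerate slot.cells 0).foldl
      (fun d p => PySem.Dict.modify d p.2 [] (fun l => l ++ [(slot.slot_id, p.1)])) d)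
    PySem.Dict.empty
  (slots, cell_to_slots)

def validate_no_singletons (width : Int) (height : Int) (black_cells : List (Int × Int)) : Bool :=
  let black := PySem.Set.ofList black_cells
  let res := pvExtractSlots width height black
  if res.1.isEmpty then false
  else
    (PySem.List.pyRange 0 height 1).all (fun row =>
      (PySem.List.pyRange 0 width 1).all (fun col =>
        if PySem.Set.contains black (row, col) then true
        else PySem.Dict.contains res.2 (row, col)))

-- ===== PORT B =====
def pvIsOpen (width height : Int) (black : PySem.Set (Int × Int)) (r c : Int) : Bool :=
  decide (0 ≤ r) && decide (r < height) && decide (0 ≤ c) && decide (c < width) &&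
    ! PySem.Set.contains black (r, c)

def validate_no_singletons_alt (width : Int) (height : Int) (black_cells : List (Int × Int)) : Bool :=
  let black := PySem.Set.ofList black_cells
  let st := (PySem.List.pyRange 0 height 1).foldl
    (fun st r => (PySem.List.pyRange 0 width 1).foldl
      (fun (st : Bool × Bool) c =>
        if pvIsOpen width height black r c then
          (true, st.2 && (pvIsOpen width height black (r - 1) c ||
                          pvIsOpen width height black (r + 1) c ||
                          pvIsOpen width height black r (c - 1) ||
                          pvIsOpen width height black r (c + 1)))
        else st) st)
    (false, true)
  st.1 && st.2

-- ===== PRECONDITION & SPEC =====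
def Spec_validate_no_singletons (width : Int) (height : Int) (black_cells : List (Int × Int)) (out : Bool) : Prop := out = validate_no_singletons_alt width height black_cells
instance (width : Int) (height : Int) (black_cells : List (Int × Int)) (out : Bool) : Decidable (Spec_validate_no_singletons width height black_cells out) := by unfold Spec_validate_no_singletons; infer_instance

-- ===== CLAIM (what is proved, stated in full; the proofs are below) =====
def Claim_equal_validate_no_singletons : Prop := ∀ (width : Int) (height : Int) (black_cells : List (Int × Int)), Dom_validate_no_singletons width height black_cells → Spec_validate_no_singletons width height black_cells (validate_no_singletons width height black_cells)

-- ===== LEMMAS AND PROOFS =====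

-- open cell / has-an-open-neighbour, as propositions (bl is the black set as a list)
def pvOpn (width height : Int) (bl : List (Int × Int)) (r c : Int) : Prop :=
  0 ≤ r ∧ r < height ∧ 0 ≤ c ∧ c < width ∧ (r, c) ∉ bl

def pvNbr (width height : Int) (bl : List (Int × Int)) (r c : Int) : Prop :=
  pvOpn width height bl (r - 1) c ∨ pvOpn width height bl (r + 1) c ∨
  pvOpn width height bl r (c - 1) ∨ pvOpn width height bl r (c + 1)

theorem pvIsOpen_iff (width height : Int) (bl : List (Int × Int)) (r c : Int) :
    pvIsOpen width height (PySem.Set.ofList bl) r c = true ↔ pvOpn width height bl r c := by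
  simp [pvIsOpen, pvOpn, PySem.Set.mem_ofList, and_assoc]


-- ---- generic fold shapes used by both characterizations ----
theorem pv_foldl_orand {α : Type} (l : List α) (p q : α → Bool) (st : Bool × Bool) :
    l.foldl (fun st x => (st.1 || p x, st.2 && q x)) st = (st.1 || l.any p, st.2 && l.all q) := by
  induction l generalizing st with
  | nil => simp
  | cons x t ih => simp [ih, Bool.or_assoc, Bool.and_assoc]

theorem pv_foldl_pres {α σ : Type} (Q : σ → Prop) (f : σ → α → σ) (l : List α)
    (hmono : ∀ st y, Q st → Q (f st y)) : ∀ st, Q st → Q (l.foldl f st) := by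
  induction l with
  | nil => intro st hst; exact hst
  | cons x t ih => intro st hst; exact ih (f st x) (hmono st x hst)

theorem pv_foldl_reach {α σ : Type} (Q : σ → Prop) (f : σ → α → σ) (l : List α) (st : σ)
    (x : α) (hx : x ∈ l) (hset : ∀ st, Q (f st x)) (hmono : ∀ st y, Q st → Q (f st y)) :
    Q (l.foldl f st) := by
  induction l generalizing st with
  | nil => cases hx
  | cons z t ih =>
    rcases List.mem_cons.mp hx with rfl | hx'
    · exact pv_foldl_pres Q f t hmono (f st x) (hset st)
    · exact ih (f st z) hx'

-- ---- B-side characterization ----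
theorem alt_form (width height : Int) (black : PySem.Set (Int × Int)) :
    ((PySem.List.pyRange 0 height 1).foldl
      (fun st r => (PySem.List.pyRange 0 width 1).foldl
        (fun (st : Bool × Bool) c =>
          if pvIsOpen width height black r c then
            (true, st.2 && (pvIsOpen width height black (r - 1) c ||
                            pvIsOpen width height black (r + 1) c ||
                            pvIsOpen width height black r (c - 1) ||
                            pvIsOpen width height black r (c + 1)))
          else st) st)
      (false, true)) =
    ((PySem.List.pyRange 0 height 1).any (fun r =>
        (PySem.List.pyRange 0 width 1).any (fun c => pvIsOpen width height black r c)),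
     (PySem.List.pyRange 0 height 1).all (fun r =>
        (PySem.List.pyRange 0 width 1).all (fun c =>
          !pvIsOpen width height black r c ||
            (pvIsOpen width height black (r - 1) c ||
             pvIsOpen width height black (r + 1) c ||
             pvIsOpen width height black r (c - 1) ||
             pvIsOpen width height black r (c + 1))))) := by
  have hin : ∀ (r : Int) (st : Bool × Bool),
      ((PySem.List.pyRange 0 width 1).foldl
        (fun (st : Bool × Bool) c =>
          if pvIsOpen width height black r c then
            (true, st.2 && (pvIsOpen width height black (r - 1) c ||
                            pvIsOpen width height black (r + 1) c ||
                            pvIsOpen width height black r (c - 1) ||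
                            pvIsOpen width height black r (c + 1)))
          else st) st) =
      (st.1 || (PySem.List.pyRange 0 width 1).any (fun c => pvIsOpen width height black r c),
       st.2 && (PySem.List.pyRange 0 width 1).all (fun c =>
          !pvIsOpen width height black r c ||
            (pvIsOpen width height black (r - 1) c ||
             pvIsOpen width height black (r + 1) c ||
             pvIsOpen width height black r (c - 1) ||
             pvIsOpen width height black r (c + 1)))) := by
    intro r st
    rw [PySem.List.foldl_congr_mem (g := fun (st : Bool × Bool) c =>
      (st.1 || pvIsOpen width height black r c,
       st.2 && (!pvIsOpen width height black r c ||
          (pvIsOpen width height black (r - 1) c ||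
           pvIsOpen width height black (r + 1) c ||
           pvIsOpen width height black r (c - 1) ||
           pvIsOpen width height black r (c + 1)))))]
    · exact pv_foldl_orand ..
    · intro acc x _
      cases h : pvIsOpen width height black r x
      · simp
      · simp
  rw [PySem.List.foldl_congr_mem (g := fun (st : Bool × Bool) r =>
    (st.1 || (PySem.List.pyRange 0 width 1).any (fun c => pvIsOpen width height black r c),
     st.2 && (PySem.List.pyRange 0 width 1).all (fun c =>
        !pvIsOpen width height black r c ||
          (pvIsOpen width height black (r - 1) c ||
           pvIsOpen width height black (r + 1) c ||
           pvIsOpen width height black r (c - 1) ||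
           pvIsOpen width height black r (c + 1)))))]
  · rw [pv_foldl_orand]; simp
  · intro acc x _; exact hin x acc

theorem alt_eq_true_iff (width height : Int) (bl : List (Int × Int)) :
    validate_no_singletons_alt width height bl = true ↔
      (∃ r c, pvOpn width height bl r c) ∧
      (∀ r c, pvOpn width height bl r c → pvNbr width height bl r c) := by
  unfold validate_no_singletons_alt
  dsimp only
  rw [alt_form]
  rw [Bool.and_eq_true]
  constructor
  · rintro ⟨hany, hall⟩
    simp only [List.any_eq_true, PySem.List.mem_pyRange_one] at hany
    obtain ⟨r, _, c, _, ho⟩ := hany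
    refine ⟨⟨r, c, (pvIsOpen_iff ..).mp ho⟩, ?_⟩
    intro r c hOpn
    simp only [List.all_eq_true, PySem.List.mem_pyRange_one] at hall
    have h1 := hall r ⟨hOpn.1, hOpn.2.1⟩ c ⟨hOpn.2.2.1, hOpn.2.2.2.1⟩
    have ho := (pvIsOpen_iff ..).mpr hOpn
    rw [ho] at h1
    simp only [Bool.not_true, Bool.false_or, Bool.or_eq_true, pvIsOpen_iff] at h1
    unfold pvNbr
    tauto
  · rintro ⟨⟨r, c, hOpn⟩, hall⟩
    constructor
    · simp only [List.any_eq_true, PySem.List.mem_pyRange_one]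
      exact ⟨r, ⟨hOpn.1, hOpn.2.1⟩, c, ⟨hOpn.2.2.1, hOpn.2.2.2.1⟩, (pvIsOpen_iff ..).mpr hOpn⟩
    · simp only [List.all_eq_true, PySem.List.mem_pyRange_one]
      intro r _ c _
      cases ho : pvIsOpen width height (PySem.Set.ofList bl) r c
      · simp
      · have hn := hall r c ((pvIsOpen_iff ..).mp ho)
        unfold pvNbr at hn
        simp only [Bool.not_true, Bool.false_or, Bool.or_eq_true, pvIsOpen_iff]
        tauto

-- ---- A-side helpers for the proofs ----
theorem pv_foldl_pres_mem {α σ : Type} (Q : σ → Prop) (f : σ → α → σ) (l : List α)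
    (hmono : ∀ st y, y ∈ l → Q st → Q (f st y)) : ∀ st, Q st → Q (l.foldl f st) := by
  induction l with
  | nil => intro st hst; exact hst
  | cons x t ih =>
    intro st hst
    exact ih (fun st' y hy hq => hmono st' y (List.mem_cons_of_mem x hy) hq) (f st x)
      (hmono st x List.mem_cons_self hst)

def pvStartsA (width : Int) (black : PySem.Set (Int × Int)) (row col : Int) : Bool :=
  (col == 0 || PySem.Set.contains black (row, col - 1)) &&
    (decide (col + 1 < width) && ! PySem.Set.contains black (row, col + 1))

def pvStartsD (height : Int) (black : PySem.Set (Int × Int)) (row col : Int) : Bool :=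
  (row == 0 || PySem.Set.contains black (row - 1, col)) &&
    (decide (row + 1 < height) && ! PySem.Set.contains black (row + 1, col))

def pvGood (width height : Int) (bl : List (Int × Int)) (s : PVSlot) : Prop :=
  s.cells ≠ [] ∧ ∀ p ∈ s.cells, pvOpn width height bl p.1 p.2 ∧ pvNbr width height bl p.1 p.2

theorem mem_pvCollectAcross (width : Int) (black : PySem.Set (Int × Int)) (row c : Int)
    (p : Int × Int) :
    p ∈ pvCollectAcross width black row c ↔
      p.1 = row ∧ c ≤ p.2 ∧ p.2 < width ∧
        ∀ k, c ≤ k → k ≤ p.2 → ¬ (PySem.Set.contains black (row, k) = true) := by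
  fun_induction pvCollectAcross width black row c with
  | case1 c h ih =>
    rw [List.mem_cons, ih]
    constructor
    · rintro (rfl | ⟨h1, h2, h3, h4⟩)
      · exact ⟨rfl, le_refl _, h.1, fun k hk1 hk2 => by
          have : k = c := le_antisymm hk2 hk1; subst this; exact h.2⟩
      · exact ⟨h1, by omega, h3, fun k hk1 hk2 => by
          rcases eq_or_lt_of_le hk1 with rfl | hlt
          · exact h.2
          · exact h4 k (by omega) hk2⟩
    · rintro ⟨h1, h2, h3, h4⟩
      rcases eq_or_lt_of_le h2 with heq | hlt
      · left; cases p; simp_all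
      · right; exact ⟨h1, by omega, h3, fun k hk1 hk2 => h4 k (by omega) hk2⟩
  | case2 c h =>
    simp only [List.not_mem_nil, false_iff]
    rintro ⟨h1, h2, h3, h4⟩
    exact h ⟨by omega, h4 c le_rfl h2⟩

theorem mem_pvCollectDown (height : Int) (black : PySem.Set (Int × Int)) (r col : Int)
    (p : Int × Int) :
    p ∈ pvCollectDown height black r col ↔
      p.2 = col ∧ r ≤ p.1 ∧ p.1 < height ∧
        ∀ k, r ≤ k → k ≤ p.1 → ¬ (PySem.Set.contains black (k, col) = true) := by
  fun_induction pvCollectDown height black r col with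
  | case1 r h ih =>
    rw [List.mem_cons, ih]
    constructor
    · rintro (rfl | ⟨h1, h2, h3, h4⟩)
      · exact ⟨rfl, le_refl _, h.1, fun k hk1 hk2 => by
          have : k = r := le_antisymm hk2 hk1; subst this; exact h.2⟩
      · exact ⟨h1, by omega, h3, fun k hk1 hk2 => by
          rcases eq_or_lt_of_le hk1 with rfl | hlt
          · exact h.2
          · exact h4 k (by omega) hk2⟩
    · rintro ⟨h1, h2, h3, h4⟩
      rcases eq_or_lt_of_le h2 with heq | hlt
      · left; cases p; simp_all
      · right; exact ⟨h1, by omega, h3, fun k hk1 hk2 => h4 k (by omega) hk2⟩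
  | case2 r h =>
    simp only [List.not_mem_nil, false_iff]
    rintro ⟨h1, h2, h3, h4⟩
    exact h ⟨by omega, h4 r le_rfl h2⟩

theorem pvStepCell_slots (width height : Int) (black : PySem.Set (Int × Int))
    (st : List PVSlot × Int × Int) (r c : Int) :
    (pvStepCell width height black st r c).1 =
      if PySem.Set.contains black (r, c) then st.1 else
        (st.1 ++
          (if pvStartsA width black r c then
            [⟨st.2.2, "across", some st.2.1, pvCollectAcross width black r c⟩] else []) ++
          (if pvStartsD height black r c then
            [⟨(if pvStartsA width black r c then st.2.2 + 1 else st.2.2), "down",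
              some st.2.1, pvCollectDown height black r c⟩] else [])) := by
  simp only [pvStepCell, pvStartsA, pvStartsD]
  split_ifs <;> simp_all

theorem pvStepCell_mem (width height : Int) (black : PySem.Set (Int × Int))
    (st : List PVSlot × Int × Int) (r c : Int) (s : PVSlot) (hs : s ∈ st.1) :
    s ∈ (pvStepCell width height black st r c).1 := by
  rw [pvStepCell_slots]
  split_ifs <;> simp [hs]

theorem pvStepCell_good (width height : Int) (bl : List (Int × Int))
    (st : List PVSlot × Int × Int) (r c : Int)
    (hr1 : 0 ≤ r) (hr2 : r < height) (hc1 : 0 ≤ c) (hc2 : c < width)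
    (hst : ∀ s ∈ st.1, pvGood width height bl s) :
    ∀ s ∈ (pvStepCell width height (PySem.Set.ofList bl) st r c).1, pvGood width height bl s := by
  intro s hs
  rw [pvStepCell_slots] at hs
  by_cases hb : PySem.Set.contains (PySem.Set.ofList bl) (r, c) = true
  · rw [if_pos hb] at hs; exact hst s hs
  rw [if_neg hb] at hs
  have hnbl : (r, c) ∉ bl := by
    simpa [PySem.Set.contains_iff, PySem.Set.mem_ofList] using hb
  simp only [List.append_assoc, List.mem_append] at hs
  rcases hs with hs | hs | hs
  · exact hst s hs
  · by_cases hA : pvStartsA width (PySem.Set.ofList bl) r c = true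
    case neg => simp [hA] at hs
    rw [if_pos hA] at hs
    simp only [List.mem_singleton] at hs
    subst hs
    have hA' := hA
    unfold pvStartsA at hA'
    simp only [Bool.and_eq_true, Bool.or_eq_true, decide_eq_true_eq, Bool.not_eq_eq_eq_not,
      Bool.not_true] at hA'
    obtain ⟨_, hlt, hnb1⟩ := hA'
    have hnbl1 : (r, c + 1) ∉ bl := by
      simpa [PySem.Set.contains_iff, PySem.Set.mem_ofList] using hnb1
    constructor
    · rw [pvCollectAcross, dif_pos ⟨by omega, hb⟩]
      simp
    · intro p hp
      rcases p with ⟨pr, pc⟩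
      rw [mem_pvCollectAcross] at hp
      obtain ⟨hp1, hp2, hp3, hp4⟩ := hp
      dsimp at hp1 hp2 hp3 hp4
      subst hp1
      have hmem : ∀ k, c ≤ k → k ≤ pc → (pr, k) ∉ bl := fun k a b => by
        simpa [PySem.Set.contains_iff, PySem.Set.mem_ofList] using hp4 k a b
      refine ⟨⟨hr1, hr2, by omega, hp3, hmem pc hp2 le_rfl⟩, ?_⟩
      rcases eq_or_lt_of_le hp2 with heq | hlt2
      · right; right; right
        exact ⟨hr1, hr2, by omega, by omega, by rw [← heq]; exact hnbl1⟩
      · right; right; left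
        exact ⟨hr1, hr2, by omega, by omega, hmem (pc - 1) (by omega) (by omega)⟩
  · by_cases hD : pvStartsD height (PySem.Set.ofList bl) r c = true
    case neg => simp [hD] at hs
    rw [if_pos hD] at hs
    simp only [List.mem_singleton] at hs
    subst hs
    have hD' := hD
    unfold pvStartsD at hD'
    simp only [Bool.and_eq_true, Bool.or_eq_true, decide_eq_true_eq, Bool.not_eq_eq_eq_not,
      Bool.not_true] at hD'
    obtain ⟨_, hlt, hnb1⟩ := hD'
    have hnbl1 : (r + 1, c) ∉ bl := by
      simpa [PySem.Set.contains_iff, PySem.Set.mem_ofList] using hnb1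
    constructor
    · rw [pvCollectDown, dif_pos ⟨by omega, hb⟩]
      simp
    · intro p hp
      rcases p with ⟨pr, pc⟩
      rw [mem_pvCollectDown] at hp
      obtain ⟨hp1, hp2, hp3, hp4⟩ := hp
      dsimp at hp1 hp2 hp3 hp4
      subst hp1
      have hmem : ∀ k, r ≤ k → k ≤ pr → (k, pc) ∉ bl := fun k a b => by
        simpa [PySem.Set.contains_iff, PySem.Set.mem_ofList] using hp4 k a b
      refine ⟨⟨by omega, hp3, hc1, hc2, hmem pr hp2 le_rfl⟩, ?_⟩
      rcases eq_or_lt_of_le hp2 with heq | hlt2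
      · right; left
        exact ⟨by omega, by omega, hc1, hc2, by rw [← heq]; exact hnbl1⟩
      · left
        exact ⟨by omega, by omega, hc1, hc2, hmem (pr - 1) (by omega) (by omega)⟩

theorem pvStepCell_reach_across (width height : Int) (black : PySem.Set (Int × Int))
    (st : List PVSlot × Int × Int) (r c : Int)
    (hb : ¬ PySem.Set.contains black (r, c) = true)
    (hA : pvStartsA width black r c = true)
    (p : Int × Int) (hp : p ∈ pvCollectAcross width black r c) :
    ∃ s ∈ (pvStepCell width height black st r c).1, p ∈ s.cells := by
  rw [pvStepCell_slots, if_neg hb]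
  exact ⟨⟨st.2.2, "across", some st.2.1, pvCollectAcross width black r c⟩, by simp [hA], hp⟩

theorem pvStepCell_reach_down (width height : Int) (black : PySem.Set (Int × Int))
    (st : List PVSlot × Int × Int) (r c : Int)
    (hb : ¬ PySem.Set.contains black (r, c) = true)
    (hD : pvStartsD height black r c = true)
    (p : Int × Int) (hp : p ∈ pvCollectDown height black r c) :
    ∃ s ∈ (pvStepCell width height black st r c).1, p ∈ s.cells := by
  rw [pvStepCell_slots, if_neg hb]
  refine ⟨⟨(if pvStartsA width black r c then st.2.2 + 1 else st.2.2), "down",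
    some st.2.1, pvCollectDown height black r c⟩, ?_, hp⟩
  simp [hD]

theorem pv_exists_start (f : Int → Bool) :
    ∀ (n : Nat) (c : Int), c.toNat = n → 0 ≤ c → ¬ f c = true →
      ∃ c0, 0 ≤ c0 ∧ c0 ≤ c ∧ (∀ k, c0 ≤ k → k ≤ c → ¬ f k = true) ∧
        (c0 = 0 ∨ f (c0 - 1) = true) := by
  intro n
  induction n with
  | zero =>
    intro c hn h0 hf
    have hc : c = 0 := by omega
    subst hc
    exact ⟨0, le_rfl, le_rfl, fun k hk1 hk2 => by
      have : k = 0 := by omega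
      subst this; exact hf, Or.inl rfl⟩
  | succ n ih =>
    intro c hn h0 hf
    by_cases hbb : f (c - 1) = true
    · exact ⟨c, h0, le_rfl, fun k hk1 hk2 => by
        have : k = c := by omega
        subst this; exact hf, Or.inr hbb⟩
    · obtain ⟨c0, g1, g2, g3, g4⟩ := ih (c - 1) (by omega) (by omega) hbb
      refine ⟨c0, g1, by omega, ?_, g4⟩
      intro k hk1 hk2
      rcases eq_or_lt_of_le hk2 with rfl | hk3
      · exact hf
      · exact g3 k hk1 (by omega)

theorem pvExtractSlots_fst (width height : Int) (bc : List (Int × Int)) :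
    (pvExtractSlots width height bc).1 =
      ((PySem.List.pyRange 0 height 1).foldl
        (fun st row => (PySem.List.pyRange 0 width 1).foldl
          (fun st col => pvStepCell width height (PySem.Set.ofList bc) st row col) st)
        ([], 1, 0)).1 := rfl

theorem pvExtractSlots_snd (width height : Int) (bc : List (Int × Int)) :
    (pvExtractSlots width height bc).2 =
      (pvExtractSlots width height bc).1.foldl
        (fun d slot => (PySem.List.enumerate slot.cells 0).foldl
          (fun d p => PySem.Dict.modify d p.2 [] (fun l => l ++ [(slot.slot_id, p.1)])) d)
        PySem.Dict.empty := rfl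

theorem pv_extract_swap (width height : Int) (bl : List (Int × Int)) :
    pvExtractSlots width height (PySem.Set.ofList bl) = pvExtractSlots width height bl := by
  unfold pvExtractSlots
  rw [PySem.Set.ofList_ofList]

theorem pv_slots_good (width height : Int) (bl : List (Int × Int)) :
    ∀ s ∈ (pvExtractSlots width height bl).1, pvGood width height bl s := by
  rw [pvExtractSlots_fst]
  refine pv_foldl_pres_mem
    (Q := fun (st : List PVSlot × Int × Int) => ∀ s ∈ st.1, pvGood width height bl s)
    _ _ ?_ ([], 1, 0) ?_
  · intro st row hrow hq
    rw [PySem.List.mem_pyRange_one] at hrow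
    refine pv_foldl_pres_mem
      (Q := fun (st : List PVSlot × Int × Int) => ∀ s ∈ st.1, pvGood width height bl s)
      _ _ ?_ st hq
    intro st' col hcol hq'
    rw [PySem.List.mem_pyRange_one] at hcol
    exact pvStepCell_good width height bl st' row col hrow.1 hrow.2 hcol.1 hcol.2 hq'
  · intro s hs; cases hs

theorem pv_slots_reach (width height : Int) (bl : List (Int × Int)) :
    ∀ r c, pvOpn width height bl r c → pvNbr width height bl r c →
      ∃ s ∈ (pvExtractSlots width height bl).1, (r, c) ∈ s.cells := by
  intro r c hOpn hNbr
  obtain ⟨hr1, hr2, hc1, hc2, hnbl⟩ := hOpn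
  have hcontains : ∀ q : Int × Int,
      (PySem.Set.contains (PySem.Set.ofList bl) q = true) ↔ q ∈ bl := by
    intro q; simp [PySem.Set.mem_ofList]
  have hmonoStep : ∀ (st : List PVSlot × Int × Int) (row col : Int),
      (∃ s ∈ st.1, (r, c) ∈ s.cells) →
      (∃ s ∈ (pvStepCell width height (PySem.Set.ofList bl) st row col).1, (r, c) ∈ s.cells) := by
    rintro st row col ⟨s, h1, h2⟩
    exact ⟨s, pvStepCell_mem width height _ st row col s h1, h2⟩
  have hmonoRow : ∀ (st : List PVSlot × Int × Int) (row : Int),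
      (∃ s ∈ st.1, (r, c) ∈ s.cells) →
      (∃ s ∈ ((PySem.List.pyRange 0 width 1).foldl
        (fun st col => pvStepCell width height (PySem.Set.ofList bl) st row col) st).1,
        (r, c) ∈ s.cells) := by
    intro st row hq
    exact pv_foldl_pres
      (Q := fun (st : List PVSlot × Int × Int) => ∃ s ∈ st.1, (r, c) ∈ s.cells)
      _ _ (fun st' y hq' => hmonoStep st' row y hq') st hq
  have doVert : (pvOpn width height bl (r - 1) c ∨ pvOpn width height bl (r + 1) c) →
      ∃ s ∈ (pvExtractSlots width height bl).1, (r, c) ∈ s.cells := by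
    intro hV
    rw [pvExtractSlots_fst]
    obtain ⟨r0, g1, g2, g3, g4⟩ := pv_exists_start
      (fun k => PySem.Set.contains (PySem.Set.ofList bl) (k, c)) r.toNat r rfl hr1
      (by simpa [hcontains] using hnbl)
    have hr0lt : r0 < r ∨ (r0 = r ∧ pvOpn width height bl (r + 1) c) := by
      rcases eq_or_lt_of_le g2 with heq | hlt
      · subst heq
        rcases hV with hU | hDn
        · exfalso
          rcases g4 with h0 | hcon
          · have := hU.1; omega
          · exact hU.2.2.2.2 ((hcontains _).mp hcon)
        · exact Or.inr ⟨rfl, hDn⟩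
      · exact Or.inl hlt
    have hsecond : r0 + 1 < height ∧
        PySem.Set.contains (PySem.Set.ofList bl) (r0 + 1, c) = false := by
      rcases hr0lt with hlt | ⟨heq, hDn⟩
      · refine ⟨by omega, ?_⟩
        have := g3 (r0 + 1) (by omega) (by omega)
        simpa [Bool.not_eq_true] using this
      · subst heq
        refine ⟨hDn.2.1, ?_⟩
        have : (r0 + 1, c) ∉ bl := hDn.2.2.2.2
        simp only [Bool.eq_false_iff, Ne, hcontains]
        exact this
    have hD : pvStartsD height (PySem.Set.ofList bl) r0 c = true := by
      unfold pvStartsD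
      simp only [Bool.and_eq_true, Bool.or_eq_true, decide_eq_true_eq, Bool.not_eq_eq_eq_not,
        Bool.not_true, beq_iff_eq]
      refine ⟨?_, hsecond.1, hsecond.2⟩
      rcases g4 with h0 | hcon
      · exact Or.inl h0
      · exact Or.inr hcon
    have hb0 : ¬ PySem.Set.contains (PySem.Set.ofList bl) (r0, c) = true := g3 r0 le_rfl g2
    have hpmem : (r, c) ∈ pvCollectDown height (PySem.Set.ofList bl) r0 c := by
      rw [mem_pvCollectDown]
      exact ⟨rfl, g2, hr2, fun k hk1 hk2 => g3 k hk1 hk2⟩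
    refine pv_foldl_reach
      (Q := fun (st : List PVSlot × Int × Int) => ∃ s ∈ st.1, (r, c) ∈ s.cells)
      _ _ ([], 1, 0) r0 ?_ ?_ ?_
    · rw [PySem.List.mem_pyRange_one]; omega
    · intro st
      refine pv_foldl_reach
        (Q := fun (st : List PVSlot × Int × Int) => ∃ s ∈ st.1, (r, c) ∈ s.cells)
        _ _ st c ?_ ?_ ?_
      · rw [PySem.List.mem_pyRange_one]; omega
      · intro st'
        exact pvStepCell_reach_down width height _ st' r0 c hb0 hD (r, c) hpmem
      · intro st' y hq; exact hmonoStep st' r0 y hq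
    · intro st y hq; exact hmonoRow st y hq
  have doHoriz : (pvOpn width height bl r (c - 1) ∨ pvOpn width height bl r (c + 1)) →
      ∃ s ∈ (pvExtractSlots width height bl).1, (r, c) ∈ s.cells := by
    intro hH
    rw [pvExtractSlots_fst]
    obtain ⟨c0, g1, g2, g3, g4⟩ := pv_exists_start
      (fun k => PySem.Set.contains (PySem.Set.ofList bl) (r, k)) c.toNat c rfl hc1
      (by simpa [hcontains] using hnbl)
    have hc0lt : c0 < c ∨ (c0 = c ∧ pvOpn width height bl r (c + 1)) := by
      rcases eq_or_lt_of_le g2 with heq | hlt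
      · subst heq
        rcases hH with hL | hR
        · exfalso
          rcases g4 with h0 | hcon
          · have := hL.2.2.1; omega
          · exact hL.2.2.2.2 ((hcontains _).mp hcon)
        · exact Or.inr ⟨rfl, hR⟩
      · exact Or.inl hlt
    have hsecond : c0 + 1 < width ∧
        PySem.Set.contains (PySem.Set.ofList bl) (r, c0 + 1) = false := by
      rcases hc0lt with hlt | ⟨heq, hR⟩
      · refine ⟨by omega, ?_⟩
        have := g3 (c0 + 1) (by omega) (by omega)
        simpa [Bool.not_eq_true] using this
      · subst heq
        refine ⟨hR.2.2.2.1, ?_⟩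
        have : (r, c0 + 1) ∉ bl := hR.2.2.2.2
        simp only [Bool.eq_false_iff, Ne, hcontains]
        exact this
    have hA : pvStartsA width (PySem.Set.ofList bl) r c0 = true := by
      unfold pvStartsA
      simp only [Bool.and_eq_true, Bool.or_eq_true, decide_eq_true_eq, Bool.not_eq_eq_eq_not,
        Bool.not_true, beq_iff_eq]
      refine ⟨?_, hsecond.1, hsecond.2⟩
      rcases g4 with h0 | hcon
      · exact Or.inl h0
      · exact Or.inr hcon
    have hb0 : ¬ PySem.Set.contains (PySem.Set.ofList bl) (r, c0) = true := g3 c0 le_rfl g2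
    have hpmem : (r, c) ∈ pvCollectAcross width (PySem.Set.ofList bl) r c0 := by
      rw [mem_pvCollectAcross]
      exact ⟨rfl, g2, hc2, fun k hk1 hk2 => g3 k hk1 hk2⟩
    refine pv_foldl_reach
      (Q := fun (st : List PVSlot × Int × Int) => ∃ s ∈ st.1, (r, c) ∈ s.cells)
      _ _ ([], 1, 0) r ?_ ?_ ?_
    · rw [PySem.List.mem_pyRange_one]; omega
    · intro st
      refine pv_foldl_reach
        (Q := fun (st : List PVSlot × Int × Int) => ∃ s ∈ st.1, (r, c) ∈ s.cells)
        _ _ st c0 ?_ ?_ ?_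
      · rw [PySem.List.mem_pyRange_one]; omega
      · intro st'
        exact pvStepCell_reach_across width height _ st' r c0 hb0 hA (r, c) hpmem
      · intro st' y hq; exact hmonoStep st' r y hq
    · intro st y hq; exact hmonoRow st y hq
  rcases hNbr with h | h | h | h
  · exact doVert (Or.inl h)
  · exact doVert (Or.inr h)
  · exact doHoriz (Or.inl h)
  · exact doHoriz (Or.inr h)

theorem pv_contains_inner (sid : Int) (l : List (Int × (Int × Int)))
    (d : PySem.Dict (Int × Int) (List (Int × Int))) (q : Int × Int) :
    PySem.Dict.contains
      (l.foldl (fun d p => PySem.Dict.modify d p.2 [] (fun v => v ++ [(sid, p.1)])) d) q =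
      (PySem.Dict.contains d q || l.any (fun p => q == p.2)) := by
  induction l generalizing d with
  | nil => simp
  | cons x t ih =>
    rw [List.foldl_cons, ih, PySem.Dict.contains_modify, List.any_cons]
    cases q == x.2 <;> simp

theorem pv_contains_cts (slots : List PVSlot)
    (d : PySem.Dict (Int × Int) (List (Int × Int))) (q : Int × Int) :
    PySem.Dict.contains
      (slots.foldl (fun d slot => (PySem.List.enumerate slot.cells 0).foldl
        (fun d p => PySem.Dict.modify d p.2 [] (fun l => l ++ [(slot.slot_id, p.1)])) d) d) q = true
      ↔ PySem.Dict.contains d q = true ∨ ∃ s ∈ slots, q ∈ s.cells := by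
  induction slots generalizing d with
  | nil => simp
  | cons s t ih =>
    rw [List.foldl_cons, ih, pv_contains_inner]
    have hmem : ((PySem.List.enumerate s.cells 0).any (fun p => q == p.2) = true) ↔
        q ∈ s.cells := by
      rw [List.any_eq_true]
      constructor
      · rintro ⟨p, hp, he⟩
        have : q = p.2 := by simpa using he
        subst this
        rw [← PySem.List.map_snd_enumerate s.cells 0]
        exact List.mem_map_of_mem hp
      · intro hq
        rw [← PySem.List.map_snd_enumerate s.cells 0] at hq
        obtain ⟨p, hp, he⟩ := List.mem_map.mp hq
        exact ⟨p, hp, by simp [he]⟩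
    simp only [Bool.or_eq_true, hmem, List.mem_cons]
    constructor
    · rintro ((h | h) | h)
      · exact Or.inl h
      · exact Or.inr ⟨s, Or.inl rfl, h⟩
      · obtain ⟨s', h1, h2⟩ := h
        exact Or.inr ⟨s', Or.inr h1, h2⟩
    · rintro (h | ⟨s', (rfl | h1), h2⟩)
      · exact Or.inl (Or.inl h)
      · exact Or.inl (Or.inr h2)
      · exact Or.inr ⟨s', h1, h2⟩

theorem a_eq_true_iff (width height : Int) (bl : List (Int × Int)) :
    validate_no_singletons width height bl = true ↔
      (∃ r c, pvOpn width height bl r c) ∧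
      (∀ r c, pvOpn width height bl r c → pvNbr width height bl r c) := by
  unfold validate_no_singletons
  dsimp only
  rw [pv_extract_swap]
  have hGood := pv_slots_good width height bl
  have hReach := pv_slots_reach width height bl
  have hcts : ∀ q : Int × Int,
      PySem.Dict.contains (pvExtractSlots width height bl).2 q = true ↔
        ∃ s ∈ (pvExtractSlots width height bl).1, q ∈ s.cells := by
    intro q
    rw [pvExtractSlots_snd, pv_contains_cts]
    simp
  constructor
  · intro hA
    by_cases hemp : (pvExtractSlots width height bl).1.isEmpty
    · rw [if_pos hemp] at hA; cases hA
    rw [if_neg hemp] at hA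
    have hne : (pvExtractSlots width height bl).1 ≠ [] := by
      simpa [List.isEmpty_iff] using hemp
    obtain ⟨s, hsmem⟩ := List.exists_mem_of_ne_nil _ hne
    have hg := hGood s hsmem
    obtain ⟨p, hp⟩ := List.exists_mem_of_ne_nil _ hg.1
    refine ⟨⟨p.1, p.2, (hg.2 p hp).1⟩, ?_⟩
    intro r c hOpn
    simp only [List.all_eq_true, PySem.List.mem_pyRange_one] at hA
    have h1 := hA r ⟨hOpn.1, hOpn.2.1⟩ c ⟨hOpn.2.2.1, hOpn.2.2.2.1⟩
    have hbF : ¬ PySem.Set.contains (PySem.Set.ofList bl) (r, c) = true := by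
      simpa [PySem.Set.contains_iff, PySem.Set.mem_ofList] using hOpn.2.2.2.2
    rw [if_neg hbF] at h1
    obtain ⟨s', hs', hcell⟩ := (hcts (r, c)).mp h1
    exact ((hGood s' hs').2 _ hcell).2
  · rintro ⟨⟨r, c, hOpn⟩, hall⟩
    obtain ⟨s, hsmem, _⟩ := hReach r c hOpn (hall r c hOpn)
    rw [if_neg (by simp [List.isEmpty_iff]; exact List.ne_nil_of_mem hsmem)]
    simp only [List.all_eq_true, PySem.List.mem_pyRange_one]
    intro row hrow col hcol
    by_cases hb : PySem.Set.contains (PySem.Set.ofList bl) (row, col) = true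
    · rw [if_pos hb]
    · rw [if_neg hb]
      have hOpn' : pvOpn width height bl row col :=
        ⟨hrow.1, hrow.2, hcol.1, hcol.2, by
          simpa [PySem.Set.contains_iff, PySem.Set.mem_ofList] using hb⟩
      obtain ⟨s', h1, h2⟩ := hReach row col hOpn' (hall row col hOpn')
      exact (hcts (row, col)).mpr ⟨s', h1, h2⟩

-- ===== VERDICT (by name: the statement is the Claim_ definition above) =====
theorem validate_no_singletons_spec : Claim_equal_validate_no_singletons := by
  intro width height black_cells _
  unfold Spec_validate_no_singletons
  rcases h : validate_no_singletons_alt width height black_cells with _ | _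
  · rcases ha : validate_no_singletons width height black_cells with _ | _
    · rfl
    · exact absurd ((alt_eq_true_iff ..).mpr ((a_eq_true_iff ..).mp ha)) (by simp [h])
  · exact (a_eq_true_iff ..).mpr ((alt_eq_true_iff ..).mp h)
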